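-- pv_equiv track=rewrite | github.com/FantasticJimmy/clover | apps/convert/main.py | match_files
-- ===== SOURCE A (Python) =====
-- def match_files(specs, data):
--     """Match files in the data directory based on the specs guidelines."""
--     matched_files = {}
--     for spec_file in specs:
--         prefix = spec_file.split(".")[
--             0
--         ]  # Get the prefix, assuming files have extensions
--         matched_files[spec_file] = [
--             data_file for data_file in data if data_file.split("_")[0] == prefix
--         ]
--
--     return matched_files
-- ===== SOURCE B (Python) =====
-- def match_files(specs, data):
--     """Match files in the data directory based on the specs guidelines."""
--     # One pass over data builds a prefix -> files index; then each spec is a single lookup.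
--     groups = {}
--     for data_file in data:
--         key = data_file.split("_")[0]
--         groups[key] = groups.get(key, []) + [data_file]
--     return {spec: groups.get(spec.split(".")[0], []) for spec in specs}
-- ===== Notes on version B (the rewrite author's own statement) =====
-- stated objective: faster
-- what changed: A scans all of data once per spec (nested loops); B makes a single grouping pass over data building a prefix->files index, then each spec is one dictionary lookup.
import Mathlib
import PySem

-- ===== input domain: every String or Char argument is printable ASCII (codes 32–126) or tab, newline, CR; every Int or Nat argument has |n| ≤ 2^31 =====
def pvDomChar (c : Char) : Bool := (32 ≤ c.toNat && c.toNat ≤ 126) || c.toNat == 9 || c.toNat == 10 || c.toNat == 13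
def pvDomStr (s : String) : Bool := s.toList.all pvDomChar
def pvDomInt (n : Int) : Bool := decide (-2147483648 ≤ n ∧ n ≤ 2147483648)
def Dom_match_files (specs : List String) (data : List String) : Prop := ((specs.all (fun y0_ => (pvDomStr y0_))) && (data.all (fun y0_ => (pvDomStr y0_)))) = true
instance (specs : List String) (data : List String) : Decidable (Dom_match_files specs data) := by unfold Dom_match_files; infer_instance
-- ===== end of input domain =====

-- B replaces A's per-spec scan of data by a single grouping pass over data and one lookup per spec (objective: faster).

-- spec_file.split(".")[0]; split with a nonempty separator is never empty, so index 0 exists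
def specPrefix (s : String) : String :=
  (PySem.List.pyGet? ((PySem.Str.split? s ".").getD []) 0).getD ""

-- data_file.split("_")[0]
def dataPrefix (s : String) : String :=
  (PySem.List.pyGet? ((PySem.Str.split? s "_").getD []) 0).getD ""

-- ===== PORT A =====
def match_files (specs : List String) (data : List String) : List (String × List String) :=
  (specs.foldl
    (fun matched spec_file =>
      let prefix_ := specPrefix spec_file
      matched.insert spec_file (data.filter (fun data_file => dataPrefix data_file == prefix_)))
    (PySem.Dict.empty : PySem.Dict String (List String))).items

-- ===== PORT B =====
def match_files_alt (specs : List String) (data : List String) : List (String × List String) :=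
  let groups : PySem.Dict String (List String) :=
    data.foldl (fun g data_file => g.modify (dataPrefix data_file) [] (· ++ [data_file]))
      PySem.Dict.empty
  (specs.foldl (fun m spec => m.insert spec (groups.getD (specPrefix spec) []))
    (PySem.Dict.empty : PySem.Dict String (List String))).items

-- ===== PRECONDITION & SPEC =====
def Spec_match_files (specs : List String) (data : List String) (out : List (String × List String)) : Prop := out = match_files_alt specs data
instance (specs : List String) (data : List String) (out : List (String × List String)) : Decidable (Spec_match_files specs data out) := by unfold Spec_match_files; infer_instance

-- ===== CLAIM (what is proved, stated in full; the proofs are below) =====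
def Claim_equal_match_files : Prop := ∀ (specs : List String) (data : List String), Dom_match_files specs data → Spec_match_files specs data (match_files specs data)

-- ===== LEMMAS AND PROOFS =====

theorem map_filter_pair (data : List String) (c : String) :
    List.map (fun x => x.2) (List.filter (fun p => p.1 == c)
      (List.map (fun df => (dataPrefix df, df)) data))
    = List.filter (fun df => dataPrefix df == c) data := by
  induction data with
  | nil => rfl
  | cons df rest ih =>
    by_cases hc : dataPrefix df == c <;> simp [hc, ih]

-- B's index lookup equals A's inner filter
theorem groups_getD (data : List String) (c : String) :
    (data.foldl (fun g df => g.modify (dataPrefix df) [] (· ++ [df]))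
      (PySem.Dict.empty : PySem.Dict String (List String))).getD c []
    = data.filter (fun df => dataPrefix df == c) := by
  have h := PySem.Dict.getD_foldl_modify_append
    (l := data.map (fun df => (dataPrefix df, df)))
    (d := (PySem.Dict.empty : PySem.Dict String (List String))) (c := c)
  rw [List.foldl_map] at h
  rw [h, map_filter_pair]; rfl

theorem foldl_insert_congr (specs : List String)
    (vA vB : String → List String) (h : ∀ s, vA s = vB s)
    (d : PySem.Dict String (List String)) :
    specs.foldl (fun m s => m.insert s (vA s)) d
      = specs.foldl (fun m s => m.insert s (vB s)) d := by
  induction specs generalizing d with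
  | nil => rfl
  | cons s rest ih => simp only [List.foldl_cons, h s, ih]

-- ===== VERDICT (by name: the statement is the Claim_ definition above) =====
theorem match_files_spec : Claim_equal_match_files := by
  intro specs data _
  unfold Spec_match_files match_files match_files_alt
  rw [foldl_insert_congr specs
    (fun s => data.filter (fun df => dataPrefix df == specPrefix s))
    (fun s => (data.foldl (fun g df => g.modify (dataPrefix df) [] (· ++ [df]))
      (PySem.Dict.empty : PySem.Dict String (List String))).getD (specPrefix s) [])
    (fun s => (groups_getD data (specPrefix s)).symm)]
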